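-- pv_equiv track=rewrite | github.com/bshort95/final_project | senor project/magic.py | cutter
-- ===== SOURCE A (Python) =====
-- def cutter(lis):
--     bob = lis.split(" ")
--     temp_list= []
--
--     fs = True
--     s = 0
--     e = 50
--     inc = 50
--     while fs:
--         if e > len(bob)-1:
--             e = len(bob)
--             fs = False
--
--         temp_list.append(" ".join(bob[s:e]))
--         s=s + inc
--         e=e + inc
--
--     return temp_list
-- ===== SOURCE B (Python) =====
-- def cutter(lis):
--     res = []
--     buf = []
--     n = 0
--     for w in lis.split(" "):
--         buf.append(w)
--         n += 1
--         if n == 50: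
--             res.append(" ".join(buf))
--             buf = []
--             n = 0
--     if buf:
--         res.append(" ".join(buf))
--     return res
-- ===== Notes on version B (the rewrite author's own statement) =====
-- stated objective: simpler
-- what changed: Replaced A's while-loop over slice indices (s/e bounds, a flag, explicit slicing and clamping of e) by a single pass over the words with a buffer and a counter, flushing the buffer every 50 words and once at the end.
import Mathlib
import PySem

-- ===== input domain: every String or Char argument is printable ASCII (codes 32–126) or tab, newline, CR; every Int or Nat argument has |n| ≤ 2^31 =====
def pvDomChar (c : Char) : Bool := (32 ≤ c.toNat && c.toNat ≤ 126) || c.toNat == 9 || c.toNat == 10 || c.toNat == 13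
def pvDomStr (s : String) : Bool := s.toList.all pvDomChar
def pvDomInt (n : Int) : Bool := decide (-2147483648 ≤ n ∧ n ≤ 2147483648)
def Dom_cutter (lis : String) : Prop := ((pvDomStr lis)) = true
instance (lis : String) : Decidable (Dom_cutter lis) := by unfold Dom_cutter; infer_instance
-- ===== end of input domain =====

-- B replaces A's index-slicing while-loop by one pass over the words with a buffer flushed every 50 words (simpler, same cost).


-- ===== PORT A =====
-- A's while-loop: s and e start at 0 and 50 and only ever grow by 50, so they are kept as Nat
-- (the Int comparison `e > len(bob)-1` is written over Int, exactly as Python computes it).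
-- In the iteration where e > len(bob)-1, Python sets e = len(bob), appends bob[s:e], and clears fs
-- (the loop ends after that iteration): that is the first branch here.
def cutterLoop (bob : List String) (s e : Nat) (temp_list : List String) : List String :=
  if (e : Int) > (bob.length : Int) - 1 then
    temp_list ++ [PySem.Str.join " " (PySem.List.slice bob (some (s : Int)) (some (bob.length : Int)))]
  else
    cutterLoop bob (s + 50) (e + 50)
      (temp_list ++ [PySem.Str.join " " (PySem.List.slice bob (some (s : Int)) (some (e : Int)))])
termination_by bob.length - e
decreasing_by omega

def cutter (lis : String) : List String :=
  let bob := (PySem.Chars.splitOn lis.toList [' ']).map String.ofList  -- lis.split(" ")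
  cutterLoop bob 0 50 []

-- ===== PORT B =====
def cutterAltLoop (words buf : List String) (n : Nat) (res : List String) : List String :=
  match words with
  | [] => if buf ≠ [] then res ++ [PySem.Str.join " " buf] else res
  | w :: ws =>
    let buf' := buf ++ [w]
    if n + 1 = 50 then cutterAltLoop ws [] 0 (res ++ [PySem.Str.join " " buf'])
    else cutterAltLoop ws buf' (n + 1) res

def cutter_alt (lis : String) : List String :=
  cutterAltLoop ((PySem.Chars.splitOn lis.toList [' ']).map String.ofList) [] 0 []

-- ===== PRECONDITION & SPEC =====
def Spec_cutter (lis : String) (out : List String) : Prop := out = cutter_alt lis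
instance (lis : String) (out : List String) : Decidable (Spec_cutter lis out) := by unfold Spec_cutter; infer_instance

-- ===== CLAIM (what is proved, stated in full; the proofs are below) =====
def Claim_equal_cutter : Prop := ∀ (lis : String), Dom_cutter lis → Spec_cutter lis (cutter lis)

-- ===== LEMMAS AND PROOFS =====

-- The common reference: the list of 50-word chunks of a nonempty word list.
def chunks (l : List String) : List String :=
  if l.length ≤ 50 then [PySem.Str.join " " l]
  else PySem.Str.join " " (l.take 50) :: chunks (l.drop 50)
termination_by l.length
decreasing_by simp; omega

theorem splitOn_go_ne_nil (sep : List Char) (fuel : Nat) (l cur : List Char)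
    (acc : List (List Char)) : PySem.Chars.splitOn.go sep fuel l cur acc ≠ [] := by
  induction fuel generalizing l cur acc with
  | zero => simp [PySem.Chars.splitOn.go]
  | succ fuel ih =>
    cases l with
    | nil => simp [PySem.Chars.splitOn.go]
    | cons c rest =>
      rw [PySem.Chars.splitOn.go]
      split
      · exact ih _ _ _
      · exact ih _ _ _

theorem splitOn_ne_nil (s sep : List Char) : PySem.Chars.splitOn s sep ≠ [] :=
  splitOn_go_ne_nil sep _ s [] []

theorem cutterLoop_eq_chunks (bob : List String) :
    ∀ (k s : Nat) (acc : List String), bob.length - s = k →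
      cutterLoop bob s (s + 50) acc = acc ++ chunks (bob.drop s) := by
  intro k
  induction k using Nat.strong_induction_on with
  | _ k ih =>
    intro s acc hk
    rw [cutterLoop, chunks]
    by_cases h : (bob.length : Int) ≤ (s : Int) + 50
    · rw [if_pos (by push_cast; omega)]
      rw [if_pos (by simp; omega)]
      rw [PySem.List.slice_natCast, List.take_of_length_le (by simp)]
    · rw [if_neg (by push_cast; omega)]
      rw [if_neg (by simp; omega)]
      have hrec := ih (bob.length - (s + 50)) (by omega) (s + 50) (acc ++
        [PySem.Str.join " " (PySem.List.slice bob (some (s : Int)) (some ((s : Nat) + 50 : Int)))]) rfl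
      have hcast : ((s + 50 : Nat) : Int) = (s : Int) + 50 := by push_cast; ring
      rw [hcast, hrec]
      rw [List.append_assoc]
      congr 1
      rw [List.drop_drop] at *
      have hslice : PySem.List.slice bob (some (s : Int)) (some ((s : Int) + 50)) =
          (bob.drop s).take 50 := by
        have := PySem.List.slice_natCast bob s (s + 50)
        push_cast at this
        simpa using this
      simp [hslice]

theorem chunks_eq_cons (buf ws : List String) (h : buf.length = 50) :
    chunks (buf ++ ws) = PySem.Str.join " " buf :: (if ws = [] then [] else chunks ws) := by
  rw [chunks]
  rcases ws with _ | ⟨v, vs⟩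
  · simp [h]
  · rw [if_neg (by simp [h]), List.take_left' h, List.drop_left' h]
    simp

theorem cutterAltLoop_eq_chunks :
    ∀ (ws buf acc : List String), buf.length < 50 →
      cutterAltLoop ws buf buf.length acc =
        if buf ++ ws = [] then acc else acc ++ chunks (buf ++ ws) := by
  intro ws
  induction ws with
  | nil =>
    intro buf acc hb
    rcases buf with _ | ⟨b, bs⟩
    · simp [cutterAltLoop]
    · rw [cutterAltLoop]
      simp only [List.append_nil, ne_eq, List.cons_ne_nil, not_false_eq_true, if_true, if_false]
      rw [chunks, if_pos (by simp at hb ⊢; omega)]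
  | cons w ws ih =>
    intro buf acc hb
    rw [cutterAltLoop]
    by_cases h : buf.length + 1 = 50
    · rw [if_pos h]
      have h0 : (0 : Nat) = ([] : List String).length := rfl
      rw [h0, ih [] _ (by simp)]
      rw [show buf ++ w :: ws = (buf ++ [w]) ++ ws by simp,
        chunks_eq_cons (buf ++ [w]) ws (by simp; omega)]
      rcases ws with _ | ⟨v, vs⟩
      · simp
      · simp
    · rw [if_neg h]
      have hlen : buf.length + 1 = (buf ++ [w]).length := by simp
      rw [hlen, ih (buf ++ [w]) acc (by simp; omega)]
      simp

-- ===== VERDICT (by name: the statement is the Claim_ definition above) =====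
theorem cutter_spec : Claim_equal_cutter := by
  intro lis _
  unfold Spec_cutter cutter cutter_alt
  set bob := (PySem.Chars.splitOn lis.toList [' ']).map String.ofList with hbob
  have hne : bob ≠ [] := by
    simp only [hbob, ne_eq, List.map_eq_nil_iff]
    exact splitOn_ne_nil _ _
  have hA := cutterLoop_eq_chunks bob (bob.length - 0) 0 [] rfl
  have hB := cutterAltLoop_eq_chunks bob [] [] (by simp)
  simp only [List.nil_append] at hB
  norm_num at hA
  simp only [List.length_nil] at hB
  rw [hA, hB, if_neg hne]
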